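-- pv_equiv track=rewrite | github.com/satyamsingh-stack/Leetcode | String/Check If String is a Prefix of Array.py | solution
-- ===== SOURCE A (Python) =====
-- def solution(st,st1):
--     ans=''
--     for i in st1:
--         ans=ans+i
--         if(ans==st):
--             return True
--         if(not st.startswith(ans)):
--             break
--     return False
-- ===== SOURCE B (Python) =====
-- def solution(st, st1):
--     # Single pointer into st: match each word at position p without rebuilding
--     # or rescanning the accumulated concatenation.
--     p = 0
--     n = len(st)
--     for w in st1:
--         if st[p:p + len(w)] != w:
--             return False
--         p += len(w)
--         if p == n:
--             return True
--     return False
-- ===== Notes on version B (the rewrite author's own statement) =====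
-- stated objective: alternative
-- what changed: Replaces the growing-concatenation-and-rescan loop (ans += word; startswith(ans)) with a single pointer into st compared against each word's slice, so no prefix is ever rebuilt or rescanned.
import Mathlib
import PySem

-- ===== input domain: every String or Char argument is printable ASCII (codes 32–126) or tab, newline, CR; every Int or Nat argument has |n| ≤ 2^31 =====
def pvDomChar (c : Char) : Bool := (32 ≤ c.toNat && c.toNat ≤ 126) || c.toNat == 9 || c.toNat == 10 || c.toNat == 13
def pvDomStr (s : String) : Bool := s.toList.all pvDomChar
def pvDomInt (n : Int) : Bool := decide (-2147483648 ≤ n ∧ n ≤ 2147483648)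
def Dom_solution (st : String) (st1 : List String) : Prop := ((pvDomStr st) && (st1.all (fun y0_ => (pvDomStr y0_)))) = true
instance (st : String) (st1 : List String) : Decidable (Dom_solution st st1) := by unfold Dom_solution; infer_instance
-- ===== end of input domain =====

-- B replaces A's growing-concatenation + startswith rescans with one pointer into st (alternative algorithm, same measured cost).

-- ===== PORT A =====
-- A's loop over st1 with the accumulated concatenation ans (strings as List Char via PySem.Chars)
def solutionA_loop (st : List Char) (ans : List Char) : List String → Bool
  | [] => false
  | i :: rest =>
    let ans' := ans ++ i.toList           -- ans = ans + i
    if ans' = st then true                -- if ans == st: return True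
    else if !(PySem.Chars.startswith st ans') then false   -- if not st.startswith(ans): break → return False
    else solutionA_loop st ans' rest

def solution (st : String) (st1 : List String) : Bool :=
  solutionA_loop st.toList [] st1

-- ===== PORT B =====
-- B's loop: pointer p into st (always ≥ 0, so kept as Nat), compare st[p:p+len(w)] with w
def solutionB_loop (st : List Char) (p : Nat) : List String → Bool
  | [] => false
  | w :: rest =>
    let wl := w.toList
    if PySem.List.slice st (some (p : Int)) (some ((p : Int) + (wl.length : Int))) ≠ wl then false
    else
      let p' := p + wl.length
      if p' = st.length then true
      else solutionB_loop st p' rest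

def solution_alt (st : String) (st1 : List String) : Bool :=
  solutionB_loop st.toList 0 st1

-- ===== PRECONDITION & SPEC =====
def Spec_solution (st : String) (st1 : List String) (out : Bool) : Prop := out = solution_alt st st1
instance (st : String) (st1 : List String) (out : Bool) : Decidable (Spec_solution st st1 out) := by unfold Spec_solution; infer_instance

-- ===== CLAIM (what is proved, stated in full; the proofs are below) =====
def Claim_equal_solution : Prop := ∀ (st : String) (st1 : List String), Dom_solution st st1 → Spec_solution st st1 (solution st st1)

-- ===== LEMMAS AND PROOFS =====

-- Loop invariant: if ans is a prefix of st and p = ans.length, the two loops agree.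
theorem loop_eq (ws : List String) (st ans : List Char) (h : ans <+: st) :
    solutionA_loop st ans ws = solutionB_loop st ans.length ws := by
  induction ws generalizing ans with
  | nil => rfl
  | cons i rest ih =>
    obtain ⟨t, ht⟩ := h
    have hdrop : st.drop ans.length = t := by
      subst ht; simp
    have hslice : PySem.List.slice st (some (ans.length : Int))
        (some ((ans.length : Int) + (i.toList.length : Int))) = t.take i.toList.length := by
      rw [PySem.List.slice_natCast_add, hdrop]
    have hpre : (ans ++ i.toList <+: st) ↔ t.take i.toList.length = i.toList := by
      constructor
      · intro hp
        obtain ⟨u, hu⟩ := hp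
        have : t = i.toList ++ u := by
          rw [← ht, List.append_assoc] at hu
          exact (List.append_cancel_left hu).symm
        simp [this]
      · intro hp
        refine ⟨t.drop i.toList.length, ?_⟩
        rw [← ht, List.append_assoc]
        have h2 := List.take_append_drop i.toList.length t
        rw [hp] at h2
        rw [h2]
    have hlen : st.length = ans.length + t.length := by subst ht; simp
    have heq : (ans ++ i.toList = st) ↔
        (t.take i.toList.length = i.toList ∧ ans.length + i.toList.length = st.length) := by
      constructor
      · intro he
        have hti : i.toList = t := by
          rw [← ht] at he
          exact List.append_cancel_left he
        constructor
        · simp [hti]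
        · rw [hlen, hti]
      · rintro ⟨h1, h2⟩
        have hlt : i.toList.length = t.length := by omega
        have hti : i.toList = t := by
          rw [← h1, hlt, List.take_length]
        rw [← ht, hti]
    have hL : i.toList.length = i.length := by simp
    simp only [solutionA_loop, solutionB_loop, hslice]
    by_cases hc : t.take i.toList.length = i.toList
    · have hc' : t.take i.length = i.toList := by rw [← hL]; exact hc
      by_cases hend : ans.length + i.toList.length = st.length
      · have hst : ans ++ i.toList = st := heq.mpr ⟨hc, hend⟩
        have hend' : ans.length + i.length = st.length := by rw [← hL]; exact hend
        simp [hc', hst, hend']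
      · have hne : ¬ (ans ++ i.toList = st) := fun he => hend (heq.mp he).2
        have hend' : ¬ (ans.length + i.length = st.length) := by rw [← hL]; exact hend
        have hp : ans ++ i.toList <+: st := hpre.mpr hc
        have hsw : PySem.Chars.startswith st (ans ++ i.toList) = true :=
          (PySem.Chars.startswith_iff st (ans ++ i.toList)).mpr hp
        have hrec := ih (ans ++ i.toList) hp
        rw [List.length_append, hL] at hrec
        simp [hc', hne, hend', hsw, hrec]
    · have hne : ¬ (ans ++ i.toList = st) := fun he => hc (heq.mp he).1
      have hnp : ¬ (ans ++ i.toList <+: st) := fun hp => hc (hpre.mp hp)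
      have hc' : ¬ (t.take i.length = i.toList) := by rw [← hL]; exact hc
      have hsw : PySem.Chars.startswith st (ans ++ i.toList) = false := by
        simp only [← Bool.not_eq_true, PySem.Chars.startswith_iff]
        exact hnp
      simp [hne, hsw, hc']

-- ===== VERDICT (by name: the statement is the Claim_ definition above) =====
theorem solution_spec : Claim_equal_solution := by
  intro st st1 _
  show solution st st1 = solution_alt st st1
  have := loop_eq st1 st.toList [] (List.nil_prefix)
  simpa [solution, solution_alt] using this
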